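-- pv_equiv track=rewrite | github.com/rokmokorel/Programiranje_1 | 03_pisanje funkcij/03_podobnost.py | podobnost
-- ===== SOURCE A (Python) =====
-- def podobnost(niz1, niz2):
--     tab = ''
--     cnt = 0
--     for i, j in zip(niz1, niz2):
--         if i == j:
--            tab += '1'
--            cnt += 1
--         else:
--             tab += '0'
--     if len(niz1) != len(niz2):
--         tab += '0' * abs(len(niz2) - len(niz1))
--     return cnt, tab
-- ===== SOURCE B (Python) =====
-- def podobnost(niz1, niz2):
--     # Index-set approach: collect the matching positions, then stamp '1's into a
--     # preallocated all-zero buffer (the padding is free: the buffer is already zeros).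
--     kratko = min(len(niz1), len(niz2))
--     zadetki = [i for i in range(kratko) if niz1[i] == niz2[i]]
--     maska = bytearray(b'0' * max(len(niz1), len(niz2)))
--     for i in zadetki:
--         maska[i] = 0x31  # ord('1')
--     return len(zadetki), maska.decode()
-- ===== Notes on version B (the rewrite author's own statement) =====
-- stated objective: alternative
-- what changed: A does one fused pass over zip(niz1,niz2) accumulating the bitmask string and a counter, then conditionally appends the padding; B never zips or accumulates: it collects the list of matching indices, preallocates an all-zero buffer of length max(len1,len2) (so the padding is implicit) and stamps '1' at each matching index in place, returning len(hits) as the count.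
import Mathlib
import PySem

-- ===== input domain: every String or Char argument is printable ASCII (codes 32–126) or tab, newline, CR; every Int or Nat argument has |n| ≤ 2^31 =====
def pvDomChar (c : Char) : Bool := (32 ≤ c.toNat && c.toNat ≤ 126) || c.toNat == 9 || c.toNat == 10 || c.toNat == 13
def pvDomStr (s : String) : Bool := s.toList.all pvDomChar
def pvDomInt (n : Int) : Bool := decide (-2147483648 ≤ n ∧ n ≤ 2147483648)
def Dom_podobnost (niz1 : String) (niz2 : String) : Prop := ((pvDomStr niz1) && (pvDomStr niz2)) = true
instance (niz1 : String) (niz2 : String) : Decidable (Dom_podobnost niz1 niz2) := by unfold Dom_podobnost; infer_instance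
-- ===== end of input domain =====

-- B replaces A's fused zip-loop with an index-set algorithm: collect the matching positions,
-- stamp '1's into a preallocated all-zero buffer, count = number of positions (objective: alternative).

-- ===== PORT A =====
-- A's fused loop: one pass over zip(niz1, niz2) accumulating (tab, cnt) together.
def podobnost (niz1 : String) (niz2 : String) : Int × String :=
  let st := (niz1.toList.zip niz2.toList).foldl
      (fun (acc : List Char × Int) p =>
        if p.1 == p.2 then (acc.1 ++ ['1'], acc.2 + 1) else (acc.1 ++ ['0'], acc.2))
      ([], 0)
  let tab :=
    if niz1.toList.length ≠ niz2.toList.length then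
      st.1 ++ List.replicate ((niz2.toList.length - (niz1.toList.length : Int)).natAbs) '0'
    else st.1
  (st.2, String.ofList tab)

-- ===== PORT B =====
-- B: matching-position list, then stamp '1' at each hit into a preallocated zero buffer.
-- (indices in 'zadetki' are in range, so the direct getD stands for Python's niz[i])
def podobnost_alt (niz1 : String) (niz2 : String) : Int × String :=
  let l1 := niz1.toList
  let l2 := niz2.toList
  let kratko := min l1.length l2.length
  let zadetki := (List.range kratko).filter (fun i => l1.getD i ' ' == l2.getD i ' ')
  let maska := zadetki.foldl (fun mk i => mk.set i '1')
      (List.replicate (max l1.length l2.length) '0')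
  ((zadetki.length : Int), String.ofList maska)

-- ===== PRECONDITION & SPEC =====
def Spec_podobnost (niz1 : String) (niz2 : String) (out : Int × String) : Prop := out = podobnost_alt niz1 niz2
instance (niz1 : String) (niz2 : String) (out : Int × String) : Decidable (Spec_podobnost niz1 niz2 out) := by unfold Spec_podobnost; infer_instance

-- ===== CLAIM =====
def Claim_equal_podobnost : Prop := ∀ (niz1 : String) (niz2 : String), Dom_podobnost niz1 niz2 → Spec_podobnost niz1 niz2 (podobnost niz1 niz2)

-- ===== LEMMAS AND PROOFS =====

-- A's fold produces the mapped bitmask together with the match count.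
theorem fold_A (z : List (Char × Char)) (acc : List Char) (c : Int) :
    z.foldl (fun (acc : List Char × Int) p =>
        if p.1 == p.2 then (acc.1 ++ ['1'], acc.2 + 1) else (acc.1 ++ ['0'], acc.2)) (acc, c)
      = (acc ++ z.map (fun p => if p.1 == p.2 then '1' else '0'),
         c + (z.countP (fun p => p.1 == p.2) : Int)) := by
  induction z generalizing acc c with
  | nil => simp
  | cons h t ih =>
    by_cases hm : h.1 = h.2
    · simp only [List.foldl_cons, List.map_cons, List.countP_cons, hm, beq_self_eq_true,
        if_true, ih, Prod.mk.injEq]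
      refine ⟨by simp, by push_cast; ring⟩
    · have hb : (h.1 == h.2) = false := by simpa using hm
      simp only [List.foldl_cons, List.map_cons, List.countP_cons, hb, Bool.false_eq_true,
        if_false, ih, Prod.mk.injEq]
      refine ⟨by simp, by push_cast; ring⟩

-- zip expressed through index lookups over the common range.
theorem zip_eq_map_range (l1 l2 : List Char) :
    l1.zip l2 = (List.range (min l1.length l2.length)).map
      (fun i => (l1.getD i ' ', l2.getD i ' ')) := by
  apply List.ext_getElem
  · simp
  · intro j h1 h2
    simp only [List.length_zip] at h1
    simp [List.getElem_zip, Nat.lt_min.mp h1]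

-- Element of the stamped buffer: '1' at hit positions (in range), untouched elsewhere.
theorem stamp_getElem? (hits : List Nat) (base : List Char) (j : Nat) :
    (hits.foldl (fun mk i => mk.set i '1') base)[j]?
      = if j ∈ hits ∧ j < base.length then some '1' else base[j]? := by
  induction hits generalizing base with
  | nil => simp
  | cons h t ih =>
    simp only [List.foldl_cons]
    rw [ih]
    by_cases hj : j ∈ t
    · simp only [hj, List.mem_cons, or_true, true_and, List.length_set]
      split_ifs with hlt
      · rfl
      · rw [List.getElem?_eq_none (by simp only [List.length_set]; omega),
          List.getElem?_eq_none (by omega)]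
    · by_cases hjh : j = h
      · subst hjh
        by_cases hlt : j < base.length
        · simp [hj, hlt, List.length_set]
        · simp [hj, hlt, List.length_set]
      · simp [hj, hjh, List.length_set, List.getElem?_set_ne (Ne.symm hjh)]

-- The stamped buffer is the bitmask over the common range followed by the padding zeros.
theorem stamp_eq_bits (l1 l2 : List Char) :
    (((List.range (min l1.length l2.length)).filter
        (fun i => l1.getD i ' ' == l2.getD i ' ')).foldl (fun mk i => mk.set i '1')
      (List.replicate (max l1.length l2.length) '0'))
    = (List.range (min l1.length l2.length)).map
        (fun i => if l1.getD i ' ' == l2.getD i ' ' then '1' else '0')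
      ++ List.replicate (max l1.length l2.length - min l1.length l2.length) '0' := by
  set m := min l1.length l2.length with hm
  set M := max l1.length l2.length with hM
  have hmM : m ≤ M := le_trans (Nat.min_le_left _ _) (Nat.le_max_left _ _)
  apply List.ext_getElem?
  intro j
  rw [stamp_getElem?]
  simp only [List.length_replicate]
  by_cases hjM : j < M
  · by_cases hjm : j < m
    · rw [List.getElem?_append_left (by simpa using hjm)]
      simp [List.mem_filter, List.mem_range, hjm, hjM]
      split_ifs <;> rfl
    · have hmem : j ∉ (List.range m).filter (fun i => l1.getD i ' ' == l2.getD i ' ') := by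
        simp only [List.mem_filter, List.mem_range]
        exact fun h => absurd h.1 hjm
      rw [List.getElem?_append_right (by simpa using hjm)]
      simp only [hmem, false_and, if_false]
      rw [List.getElem?_replicate, List.getElem?_replicate]
      simp only [List.length_map, List.length_range]
      have : j - m < M - m := by omega
      simp [hjM, this]
  · have hmem : j ∉ (List.range m).filter (fun i => l1.getD i ' ' == l2.getD i ' ') := by
      simp only [List.mem_filter, List.mem_range]
      intro h; omega
    simp only [hmem, false_and, if_false]
    rw [List.getElem?_replicate, List.getElem?_eq_none]
    · simp [hjM]
    · simp only [List.length_append, List.length_map, List.length_range, List.length_replicate]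
      omega

-- A's conditional padding equals the preallocated buffer's padding.
theorem pad_eq (bits : List Char) (m n : Nat) :
    (if m ≠ n then bits ++ List.replicate (((n : Int) - m).natAbs) '0' else bits)
      = bits ++ List.replicate (max m n - min m n) '0' := by
  have habs : (((n : Int) - m)).natAbs = max m n - min m n := by omega
  by_cases h : m = n
  · subst h; simp
  · simp [h, habs]

-- ===== VERDICT =====
theorem podobnost_spec : Claim_equal_podobnost := by
  intro niz1 niz2 _
  unfold Spec_podobnost podobnost podobnost_alt
  simp only [fold_A, List.nil_append, zero_add, pad_eq, stamp_eq_bits]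
  rw [Prod.mk.injEq]
  constructor
  · rw [zip_eq_map_range, List.countP_map, List.countP_eq_length_filter]; rfl
  · rw [zip_eq_map_range, List.map_map]
    rfl
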